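-- pv_equiv track=rewrite | github.com/svenu38/livdet2025_liveness_recognition | scripts/data_preprocessing_all.py | get_label_and_spoof_from_path
-- ===== SOURCE A (Python) =====
-- def get_label_and_spoof_from_path(path_parts):
--     for i in reversed(range(len(path_parts))):
--         name = path_parts[i].lower()
--         if name in ["live", "alive"]:
--             return "Live", ""
--         elif name in ["fake", "spoof"]:
--             if i + 1 < len(path_parts):
--                 return "Fake", path_parts[i + 1]
--             else:
--                 return "Fake", "Unknown"
--         elif name in ["gelatin", "silicone", "latex", "playdoh", "wood glue", "body double", "ecoflex", "modasil"]:
--             return "Fake", path_parts[i]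
--     return "Unknown", ""
-- ===== SOURCE B (Python) =====
-- def get_label_and_spoof_from_path(path_parts):
--     result = ("Unknown", "")
--     n = len(path_parts)
--     for i in range(n):
--         name = path_parts[i].lower()
--         if name in ("live", "alive"):
--             result = ("Live", "")
--         elif name in ("fake", "spoof"):
--             result = ("Fake", path_parts[i + 1] if i + 1 < n else "Unknown")
--         elif name in ("gelatin", "silicone", "latex", "playdoh", "wood glue", "body double", "ecoflex", "modasil"):
--             result = ("Fake", path_parts[i])
--     return result
-- ===== Notes on version B (the rewrite author's own statement) =====
-- stated objective: alternative
-- what changed: Replaces the reverse scan with early return by a single forward pass that keeps overwriting an accumulator, so the last-indexed keyword wins instead of returning at the first match of the reverse scan.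
import Mathlib
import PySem

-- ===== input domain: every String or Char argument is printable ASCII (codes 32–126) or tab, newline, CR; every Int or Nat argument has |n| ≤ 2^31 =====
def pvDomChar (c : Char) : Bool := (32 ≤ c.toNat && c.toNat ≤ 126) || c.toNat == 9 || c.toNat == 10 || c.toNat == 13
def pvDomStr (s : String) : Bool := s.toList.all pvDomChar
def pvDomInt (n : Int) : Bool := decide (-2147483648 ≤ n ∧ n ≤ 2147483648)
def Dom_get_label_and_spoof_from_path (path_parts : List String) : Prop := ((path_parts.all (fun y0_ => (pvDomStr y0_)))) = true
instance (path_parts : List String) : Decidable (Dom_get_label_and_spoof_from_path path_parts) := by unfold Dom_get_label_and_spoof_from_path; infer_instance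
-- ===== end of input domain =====

-- B replaces A's reverse scan with early return by one forward accumulator pass (last match wins); same results.
-- ===== PORT A =====
def pvMaterials : List String :=
  ["gelatin", "silicone", "latex", "playdoh", "wood glue", "body double", "ecoflex", "modasil"]

-- the reversed(range(len)) loop with early return, as downward recursion on the index
def pvGoA (path_parts : List String) : Nat → String × String
  | 0 => ("Unknown", "")
  | i + 1 =>
    let name := PySem.Str.lower (path_parts.getD i "")
    if name ∈ ["live", "alive"] then ("Live", "")
    else if name ∈ ["fake", "spoof"] then
      if i + 1 < path_parts.length then ("Fake", path_parts.getD (i + 1) "")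
      else ("Fake", "Unknown")
    else if name ∈ pvMaterials then ("Fake", path_parts.getD i "")
    else pvGoA path_parts i

def get_label_and_spoof_from_path (path_parts : List String) : String × String :=
  pvGoA path_parts path_parts.length

-- ===== PORT B =====
-- one forward pass: the loop body of Source B, folded over the indices in order
def pvStepB (path_parts : List String) (acc : String × String) (i : Nat) : String × String :=
  let part := path_parts.getD i ""
  let name := PySem.Str.lower part
  if name ∈ ["live", "alive"] then ("Live", "")
  else if name ∈ ["fake", "spoof"] then
    ("Fake", if i + 1 < path_parts.length then path_parts.getD (i + 1) "" else "Unknown")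
  else if name ∈ pvMaterials then ("Fake", part)
  else acc

def get_label_and_spoof_from_path_alt (path_parts : List String) : String × String :=
  (List.range path_parts.length).foldl (pvStepB path_parts) ("Unknown", "")

-- ===== PRECONDITION & SPEC =====
def Spec_get_label_and_spoof_from_path (path_parts : List String) (out : String × String) : Prop := out = get_label_and_spoof_from_path_alt path_parts
instance (path_parts : List String) (out : String × String) : Decidable (Spec_get_label_and_spoof_from_path path_parts out) := by unfold Spec_get_label_and_spoof_from_path; infer_instance

-- ===== CLAIM (what is proved, stated in full; the proofs are below) =====
def Claim_equal_get_label_and_spoof_from_path : Prop := ∀ (path_parts : List String), Dom_get_label_and_spoof_from_path path_parts → Spec_get_label_and_spoof_from_path path_parts (get_label_and_spoof_from_path path_parts)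

-- ===== LEMMAS AND PROOFS =====
-- reverse first-match scan = forward last-match accumulation, by induction on the scanned prefix
theorem pvGoA_eq_foldl (path_parts : List String) :
    ∀ n, pvGoA path_parts n = (List.range n).foldl (pvStepB path_parts) ("Unknown", "")
  | 0 => rfl
  | n + 1 => by
    rw [List.range_succ, List.foldl_append, ← pvGoA_eq_foldl path_parts n]
    simp only [pvGoA, pvStepB, List.foldl_cons, List.foldl_nil]
    split_ifs <;> rfl

-- ===== VERDICT (by name: the statement is the Claim_ definition above) =====
theorem get_label_and_spoof_from_path_spec : Claim_equal_get_label_and_spoof_from_path := by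
  intro path_parts _
  unfold Spec_get_label_and_spoof_from_path get_label_and_spoof_from_path get_label_and_spoof_from_path_alt
  exact pvGoA_eq_foldl path_parts path_parts.length
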